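-- pv_equiv track=rewrite | github.com/hkust-nlp/Toolathlon | utils/aux_tools/history_manager.py | _extract_match_context
-- ===== SOURCE A (Python) =====
-- from typing import List, Dict, Any, Optional, Tuple
--
-- def _extract_match_context(content: str, keywords: List[str], context_length: int = 50) -> str:
--     """提取关键词周围的上下文"""
--     content_lower = content.lower()
--
--     # 找到第一个关键词的位置
--     first_match_pos = len(content)
--     matched_keyword = ""
--     for keyword in keywords:
--         pos = content_lower.find(keyword.lower())
--         if pos != -1 and pos < first_match_pos:
--             first_match_pos = pos
--             matched_keyword = keyword
--
--     if first_match_pos == len(content):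
--         return content[:100] + "..." if len(content) > 100 else content
--
--     # 提取上下文
--     start = max(0, first_match_pos - context_length)
--     end = min(len(content), first_match_pos + len(matched_keyword) + context_length)
--
--     context = content[start:end]
--     if start > 0:
--         context = "..." + context
--     if end < len(content):
--         context = context + "..."
--
--     return context
-- ===== SOURCE B (Python) =====
-- from typing import List
--
-- def _extract_match_context(content: str, keywords: List[str], context_length: int = 50) -> str:
--     """Position-major scan: walk the text once left-to-right and stop at the first
--     position where any keyword starts (keywords tried in list order)."""
--     cl = content.lower()
--     pairs = [(k.lower(), k) for k in keywords]
--     n = len(content)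
--     found = None
--     for p in range(n):
--         for lk, k in pairs:
--             if cl.startswith(lk, p):
--                 found = (p, k)
--                 break
--         if found is not None:
--             break
--     if found is None:
--         return content[:100] + "..." if n > 100 else content
--     pos, kw = found
--     start = max(0, pos - context_length)
--     end = min(n, pos + len(kw) + context_length)
--     context = content[start:end]
--     if start > 0:
--         context = "..." + context
--     if end < n:
--         context = context + "..."
--     return context
-- ===== Notes on version B (the rewrite author's own statement) =====
-- stated objective: alternative
-- what changed: Replaces A's keyword-major pass (one full substring search per keyword, then a running minimum with list-order tie-break) by a single position-major left-to-right scan of the text that stops at the first position where any keyword starts, keywords tried in list order.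
import Mathlib
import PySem

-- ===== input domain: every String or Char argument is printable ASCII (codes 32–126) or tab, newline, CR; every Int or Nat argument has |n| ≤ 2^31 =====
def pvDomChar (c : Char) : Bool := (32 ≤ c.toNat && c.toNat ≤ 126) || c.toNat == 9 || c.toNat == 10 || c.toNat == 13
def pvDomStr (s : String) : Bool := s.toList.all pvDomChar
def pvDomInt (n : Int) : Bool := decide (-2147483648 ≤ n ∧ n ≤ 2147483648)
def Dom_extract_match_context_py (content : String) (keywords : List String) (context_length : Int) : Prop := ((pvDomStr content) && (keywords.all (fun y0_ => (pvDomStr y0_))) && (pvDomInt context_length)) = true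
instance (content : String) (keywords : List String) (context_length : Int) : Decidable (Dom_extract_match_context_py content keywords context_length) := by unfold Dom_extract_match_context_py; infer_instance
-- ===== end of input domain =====

-- B replaces A's keyword-major pass (one full substring search per keyword, then a
-- running minimum) by a single position-major left-to-right scan that stops at the
-- first position where any keyword starts (keywords tried in list order); alternative
-- decomposition, same results.

-- ===== PORT A =====
-- the body of A's `for keyword in keywords` loop (state = (first_match_pos, matched_keyword))
def pvStepA (content_lower : List Char) (st : Int × String) (keyword : String) : Int × String :=
  let pos := PySem.Chars.find content_lower (PySem.Chars.lower keyword.toList)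
  if pos ≠ -1 ∧ pos < st.1 then (pos, keyword) else st

-- A's code after the loop: the no-match fallback, else context slicing around (fmp, mk)
def pvCtxA (content : String) (context_length : Int) (fmp : Int) (mk : String) : String :=
  if fmp = (content.toList.length : Int) then
    (if (content.toList.length : Int) > 100 then
       String.ofList (PySem.List.slice content.toList none (some 100)) ++ "..."
     else content)
  else
    let start := max 0 (fmp - context_length)
    let stop := min (content.toList.length : Int) (fmp + (mk.toList.length : Int) + context_length)
    let context := String.ofList (PySem.List.slice content.toList (some start) (some stop))
    let context := if start > 0 then "..." ++ context else context
    let context := if stop < (content.toList.length : Int) then context ++ "..." else context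
    context

def extract_match_context_py (content : String) (keywords : List String) (context_length : Int) : String :=
  pvCtxA content context_length
    (keywords.foldl (pvStepA (PySem.Chars.lower content.toList)) (((content.toList.length : Int)), "")).1
    (keywords.foldl (pvStepA (PySem.Chars.lower content.toList)) (((content.toList.length : Int)), "")).2

-- ===== PORT B =====
-- B's inner loop: first (lowered, original) keyword pair whose lowered form starts at this suffix
def pvInner : List (List Char × String) → List Char → Option String
  | [], _ => none
  | (lk, k) :: rest, suffix => if lk.isPrefixOf suffix then some k else pvInner rest suffix

-- B's outer loop over positions p (with break at the first hit)
def pvScan (content_lower : List Char) (pairs : List (List Char × String)) : List Nat → Option (Nat × String)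
  | [] => none
  | p :: rest =>
    match pvInner pairs (content_lower.drop p) with
    | some k => some (p, k)
    | none => pvScan content_lower pairs rest

-- B's context slicing around the found (pos, kw)
def pvCtxB (content : String) (context_length : Int) (p : Nat) (kw : String) : String :=
  let start := max 0 ((p : Int) - context_length)
  let stop := min (content.toList.length : Int) ((p : Int) + (kw.toList.length : Int) + context_length)
  let context := String.ofList (PySem.List.slice content.toList (some start) (some stop))
  let context := if start > 0 then "..." ++ context else context
  let context := if stop < (content.toList.length : Int) then context ++ "..." else context
  context

def extract_match_context_py_alt (content : String) (keywords : List String) (context_length : Int) : String :=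
  match pvScan (PySem.Chars.lower content.toList)
      (keywords.map fun k => (PySem.Chars.lower k.toList, k))
      (List.range content.toList.length) with
  | none =>
    (if (content.toList.length : Int) > 100 then
       String.ofList (PySem.List.slice content.toList none (some 100)) ++ "..."
     else content)
  | some (p, kw) => pvCtxB content context_length p kw

-- ===== PRECONDITION & SPEC =====
def Spec_extract_match_context_py (content : String) (keywords : List String) (context_length : Int) (out : String) : Prop := out = extract_match_context_py_alt content keywords context_length
instance (content : String) (keywords : List String) (context_length : Int) (out : String) : Decidable (Spec_extract_match_context_py content keywords context_length out) := by unfold Spec_extract_match_context_py; infer_instance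

-- ===== CLAIM (what is proved, stated in full; the proofs are below) =====
def Claim_equal_extract_match_context_py : Prop := ∀ (content : String) (keywords : List String) (context_length : Int), Dom_extract_match_context_py content keywords context_length → Spec_extract_match_context_py content keywords context_length (extract_match_context_py content keywords context_length)

-- ===== LEMMAS AND PROOFS =====

-- B's inner loop over the zipped pairs is find? over the keyword list
lemma pvInner_eq_find? (keywords : List String) (suffix : List Char) :
    pvInner (keywords.map fun k => (PySem.Chars.lower k.toList, k)) suffix
      = keywords.find? (fun k => (PySem.Chars.lower k.toList).isPrefixOf suffix) := by
  induction keywords with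
  | nil => rfl
  | cons k ks ih =>
    by_cases h : (PySem.Chars.lower k.toList).isPrefixOf suffix
    · simp [pvInner, h]
    · simp [pvInner, h, ih]

lemma pvScan_none (cl : List Char) (pairs : List (List Char × String)) (ps : List Nat)
    (h : pvScan cl pairs ps = none) :
    ∀ q ∈ ps, pvInner pairs (cl.drop q) = none := by
  induction ps with
  | nil => simp
  | cons q rest ih =>
    rw [pvScan] at h
    rcases hq : pvInner pairs (cl.drop q) with _ | k0
    · rw [hq] at h
      intro r hr
      rcases List.mem_cons.mp hr with rfl | hr'
      · exact hq
      · exact ih h r hr'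
    · rw [hq] at h; exact absurd h (by simp)

lemma pvScan_some (cl : List Char) (pairs : List (List Char × String)) (ps : List Nat)
    (hps : ps.Pairwise (· < ·)) (p : Nat) (kw : String)
    (h : pvScan cl pairs ps = some (p, kw)) :
    p ∈ ps ∧ pvInner pairs (cl.drop p) = some kw ∧
      ∀ q ∈ ps, q < p → pvInner pairs (cl.drop q) = none := by
  induction ps with
  | nil => simp [pvScan] at h
  | cons q rest ih =>
    rw [pvScan] at h
    rcases hq : pvInner pairs (cl.drop q) with _ | k0
    · rw [hq] at h
      obtain ⟨h1, h2, h3⟩ := ih (List.Pairwise.of_cons hps) h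
      refine ⟨List.mem_cons_of_mem _ h1, h2, ?_⟩
      intro r hr hrp
      rcases List.mem_cons.mp hr with rfl | hr'
      · exact hq
      · exact h3 r hr' hrp
    · rw [hq] at h
      obtain ⟨rfl, rfl⟩ : q = p ∧ k0 = kw := by
        have := Option.some.inj h; exact ⟨congrArg Prod.fst this, congrArg Prod.snd this⟩
      refine ⟨List.mem_cons_self, hq, ?_⟩
      intro r hr hrp
      rcases List.mem_cons.mp hr with rfl | hr'
      · omega
      · exact absurd ((List.pairwise_cons.mp hps).1 r hr') (by omega)

-- A's fold leaves the state alone if no keyword beats it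
lemma pvFold_const (cl : List Char) (ks : List String) (st : Int × String)
    (h : ∀ k ∈ ks, ¬ (PySem.Chars.find cl (PySem.Chars.lower k.toList) ≠ -1 ∧
                      PySem.Chars.find cl (PySem.Chars.lower k.toList) < st.1)) :
    ks.foldl (pvStepA cl) st = st := by
  induction ks with
  | nil => rfl
  | cons k ks ih =>
    rw [List.foldl_cons]
    have hstep : pvStepA cl st k = st := by
      unfold pvStepA
      exact if_neg (h k List.mem_cons_self)
    rw [hstep]
    exact ih (fun k' hk' => h k' (List.mem_cons_of_mem _ hk'))

-- A's running minimum stays above p while every keyword's find is above p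
lemma pvFold_gt (cl : List Char) (ks : List String) (p : Int)
    (h : ∀ k ∈ ks, PySem.Chars.find cl (PySem.Chars.lower k.toList) ≠ -1 →
         p < PySem.Chars.find cl (PySem.Chars.lower k.toList)) :
    ∀ st : Int × String, p < st.1 → p < (ks.foldl (pvStepA cl) st).1 := by
  induction ks with
  | nil => intro st hst; simpa
  | cons k ks ih =>
    intro st hst
    rw [List.foldl_cons]
    apply ih (fun k' hk' => h k' (List.mem_cons_of_mem _ hk'))
    simp only [pvStepA]
    split_ifs with hc
    · exact h k List.mem_cons_self hc.1
    · exact hst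

-- a keyword occurring at position q has a find ≤ q (and ≠ -1)
lemma pvFind_le_of_prefix (cl : List Char) (k : String) (q : Nat)
    (h : PySem.Chars.lower k.toList <+: cl.drop q) :
    PySem.Chars.find cl (PySem.Chars.lower k.toList) ≠ -1 ∧
    PySem.Chars.find cl (PySem.Chars.lower k.toList) ≤ (q : Int) := by
  have hinf : PySem.Chars.lower k.toList <:+: cl :=
    (PySem.Chars.isIn_iff_infix _ _).mp ((PySem.Chars.exists_prefix_drop_iff_isIn _ _).mp ⟨q, h⟩)
  have hne : PySem.Chars.find cl (PySem.Chars.lower k.toList) ≠ -1 := by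
    simp [PySem.Chars.find_eq_neg_one_iff, hinf]
  have h1 := PySem.Chars.neg_one_le_find cl (PySem.Chars.lower k.toList)
  have h0 : 0 ≤ PySem.Chars.find cl (PySem.Chars.lower k.toList) := by omega
  have hspec := PySem.Chars.find_spec h0
  have hmin : ¬ (q < (PySem.Chars.find cl (PySem.Chars.lower k.toList)).toNat) :=
    fun hq => hspec.2 q hq h
  exact ⟨hne, by omega⟩

-- a keyword with find ≠ -1 occurs at position find.toNat
lemma pvPrefix_of_find (cl : List Char) (k : String)
    (h : PySem.Chars.find cl (PySem.Chars.lower k.toList) ≠ -1) :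
    PySem.Chars.lower k.toList <+:
      cl.drop (PySem.Chars.find cl (PySem.Chars.lower k.toList)).toNat := by
  have h1 := PySem.Chars.neg_one_le_find cl (PySem.Chars.lower k.toList)
  exact (PySem.Chars.find_spec (by omega)).1

-- ===== VERDICT (by name: the statement is the Claim_ definition above) =====
theorem extract_match_context_py_spec : Claim_equal_extract_match_context_py := by
  intro content keywords cL _
  unfold Spec_extract_match_context_py extract_match_context_py extract_match_context_py_alt
  rcases hscan : pvScan (PySem.Chars.lower content.toList)
      (keywords.map fun k => (PySem.Chars.lower k.toList, k))
      (List.range content.toList.length) with _ | ⟨p, kw⟩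
  · -- no keyword occurs anywhere: A's fold keeps (len, ""), both take the fallback branch
    have hall := pvScan_none _ _ _ hscan
    have hv : ∀ k ∈ keywords,
        ¬ (PySem.Chars.find (PySem.Chars.lower content.toList) (PySem.Chars.lower k.toList) ≠ -1 ∧
           PySem.Chars.find (PySem.Chars.lower content.toList) (PySem.Chars.lower k.toList) <
             (((content.toList.length : Int), ("" : String)) : Int × String).1) := by
      intro k hk hcon
      obtain ⟨hne, hlt⟩ := hcon
      have hpre := pvPrefix_of_find _ _ hne
      have h1 := PySem.Chars.neg_one_le_find (PySem.Chars.lower content.toList) (PySem.Chars.lower k.toList)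
      have hlt' : PySem.Chars.find (PySem.Chars.lower content.toList) (PySem.Chars.lower k.toList) <
          (content.toList.length : Int) := hlt
      have hq : (PySem.Chars.find (PySem.Chars.lower content.toList) (PySem.Chars.lower k.toList)).toNat ∈
          List.range content.toList.length := by
        apply List.mem_range.mpr; omega
      have hnone := hall _ hq
      rw [pvInner_eq_find?] at hnone
      exact absurd (List.isPrefixOf_iff_prefix.mpr hpre) (by simpa using List.find?_eq_none.mp hnone k hk)
    rw [hscan, pvFold_const (PySem.Chars.lower content.toList) keywords _ hv]
    unfold pvCtxA
    rw [if_pos rfl]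
  · -- first matching position p, first keyword kw there: A's fold ends in ((p : Int), kw)
    have hps := (List.pairwise_lt_range (n := content.toList.length))
    obtain ⟨hpmem, hinner, hbef⟩ := pvScan_some _ _ _ hps p kw hscan
    have hp : p < content.toList.length := List.mem_range.mp hpmem
    rw [pvInner_eq_find?] at hinner
    have hmin : ∀ q, q < p → ∀ k ∈ keywords,
        ¬ (PySem.Chars.lower k.toList <+: (PySem.Chars.lower content.toList).drop q) := by
      intro q hqp k hk hpre
      have hq := hbef q (List.mem_range.mpr (lt_trans hqp hp)) hqp
      rw [pvInner_eq_find?] at hq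
      exact absurd (List.isPrefixOf_iff_prefix.mpr hpre) (by simpa using List.find?_eq_none.mp hq k hk)
    have hge : ∀ k ∈ keywords,
        PySem.Chars.find (PySem.Chars.lower content.toList) (PySem.Chars.lower k.toList) ≠ -1 →
        (p : Int) ≤ PySem.Chars.find (PySem.Chars.lower content.toList) (PySem.Chars.lower k.toList) := by
      intro k hk hne
      have hpre := pvPrefix_of_find _ _ hne
      have h1 := PySem.Chars.neg_one_le_find (PySem.Chars.lower content.toList) (PySem.Chars.lower k.toList)
      by_contra hlt
      rw [not_le] at hlt
      exact hmin _ (by omega) k hk hpre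
    obtain ⟨hpkw, l₁, l₂, hsplit, hl₁⟩ := List.find?_eq_some_iff_append.mp hinner
    have hkwpre : PySem.Chars.lower kw.toList <+: (PySem.Chars.lower content.toList).drop p :=
      List.isPrefixOf_iff_prefix.mp hpkw
    have hkwmem : kw ∈ keywords := by rw [hsplit]; exact List.mem_append_right _ List.mem_cons_self
    have hfkw : PySem.Chars.find (PySem.Chars.lower content.toList) (PySem.Chars.lower kw.toList) = (p : Int) := by
      obtain ⟨hne, hle⟩ := pvFind_le_of_prefix _ _ _ hkwpre
      exact le_antisymm hle (hge kw hkwmem hne)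
    have hl₁' : ∀ k ∈ l₁,
        PySem.Chars.find (PySem.Chars.lower content.toList) (PySem.Chars.lower k.toList) ≠ -1 →
        (p : Int) < PySem.Chars.find (PySem.Chars.lower content.toList) (PySem.Chars.lower k.toList) := by
      intro k hk hne
      have hkmem : k ∈ keywords := by rw [hsplit]; exact List.mem_append_left _ hk
      rcases lt_or_eq_of_le (hge k hkmem hne) with h | h
      · exact h
      · exfalso
        have hpre := pvPrefix_of_find _ _ hne
        have h1 := PySem.Chars.neg_one_le_find (PySem.Chars.lower content.toList) (PySem.Chars.lower k.toList)
        have htoNat : (PySem.Chars.find (PySem.Chars.lower content.toList) (PySem.Chars.lower k.toList)).toNat = p := by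
          omega
        rw [htoNat] at hpre
        have hb := hl₁ k hk
        rw [Bool.not_eq_true'] at hb
        exact absurd (List.isPrefixOf_iff_prefix.mpr hpre) (by simp [hb])
    have hst1 := pvFold_gt _ l₁ (p : Int) hl₁' ((content.toList.length : Int), "")
      (by dsimp only; exact_mod_cast hp)
    have hstep : pvStepA (PySem.Chars.lower content.toList)
        (l₁.foldl (pvStepA (PySem.Chars.lower content.toList)) ((content.toList.length : Int), "")) kw
        = ((p : Int), kw) := by
      simp only [pvStepA, hfkw]
      rw [if_pos ⟨by omega, hst1⟩]
    have hfold : keywords.foldl (pvStepA (PySem.Chars.lower content.toList))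
        ((content.toList.length : Int), "") = ((p : Int), kw) := by
      rw [hsplit, List.foldl_append, List.foldl_cons, hstep]
      apply pvFold_const
      intro k hk hcon
      have hkmem : k ∈ keywords := by rw [hsplit]; exact List.mem_append_right _ (List.mem_cons_of_mem _ hk)
      have hgek := hge k hkmem hcon.1
      have h2 : PySem.Chars.find (PySem.Chars.lower content.toList) (PySem.Chars.lower k.toList) < (p : Int) := hcon.2
      omega
    rw [hscan, hfold]
    unfold pvCtxA pvCtxB
    rw [if_neg (show ¬ (((p : Int), kw).1 = (content.toList.length : Int)) by dsimp only; omega)]
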